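-- pv_equiv track=rewrite | github.com/XFroggyX/Rock-Paper-Scissors | game.py | update_opions
-- ===== SOURCE A (Python) =====
-- def update_opions(standart_options):
--     combinations = {}
--     size = len(standart_options) // 2
--     for item in standart_options:
--         lose_combine = ""
--         index_slice = 0  # to switch to the (0 - i) element
--         for i in range(size):
--             if standart_options.index(item) + i + 1 >= len(standart_options):
--                 lose_combine = lose_combine + f"{standart_options[index_slice]} "
--                 index_slice += 1
--             else:
--                 index = standart_options.index(item)
--                 lose_combine = lose_combine + f"{standart_options[index + i + 1]} "
--
--         win_combine = ""
--         index_slice = -1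
--         for i in range(size):
--             if standart_options.index(item) - i - 1 < 0:
--                 win_combine = win_combine + f"{standart_options[index_slice]} "
--                 index_slice -= 1
--             else:
--                 index = standart_options.index(item)
--                 win_combine = win_combine + f"{standart_options[index - i - 1]} "
--         combinations[item] = dict(win=win_combine, lose=lose_combine)
--     return combinations
-- ===== SOURCE B (Python) =====
-- def update_opions(standart_options):
--     combinations = {}
--     n = len(standart_options)
--     size = n // 2
--     doubled = standart_options + standart_options
--     for item in standart_options:
--         idx = standart_options.index(item)
--         lose_combine = ''.join(f"{x} " for x in doubled[idx + 1:idx + 1 + size])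
--         win_combine = ''.join(f"{x} " for x in reversed(doubled[idx + n - size:idx + n]))
--         combinations[item] = dict(win=win_combine, lose=lose_combine)
--     return combinations
-- ===== Notes on version B (the rewrite author's own statement) =====
-- stated objective: faster
-- what changed: Replaces the two inner index-walking loops with wrap-around branches (and a repeated .index call per iteration) by slicing circular windows out of a doubled list and joining them, computing .index once per item.
import Mathlib
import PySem

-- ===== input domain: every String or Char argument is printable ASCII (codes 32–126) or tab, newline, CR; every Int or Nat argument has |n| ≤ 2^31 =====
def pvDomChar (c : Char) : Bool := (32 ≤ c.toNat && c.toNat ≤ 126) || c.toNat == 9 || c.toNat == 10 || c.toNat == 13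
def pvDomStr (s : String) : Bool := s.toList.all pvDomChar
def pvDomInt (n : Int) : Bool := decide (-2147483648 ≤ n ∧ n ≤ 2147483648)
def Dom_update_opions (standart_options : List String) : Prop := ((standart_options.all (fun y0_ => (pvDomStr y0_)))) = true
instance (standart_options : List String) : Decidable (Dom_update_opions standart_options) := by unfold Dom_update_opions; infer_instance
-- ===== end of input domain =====

-- B replaces A's wrap-branch index loops (which call .index on every inner iteration) by slicing
-- circular windows out of a doubled list, computing .index once per item.

-- ===== PORT A =====
-- A's `for i in range(size)` loops become folds over pyRange with state (string, index_slice);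
-- `item` is always a member of standart_options, so `.index` never raises and getD's default 0 is unreachable.
def update_opions (standart_options : List String) : List (String × List (String × String)) :=
  let size : Int := PySem.Int.floordiv (standart_options.length : Int) 2
  (standart_options.foldl (fun combinations item =>
    let loseSt := (PySem.List.pyRange 0 size 1).foldl (fun st i =>
        if ((PySem.List.index? standart_options item).getD 0 : Int) + i + 1 ≥ (standart_options.length : Int) then
          (st.1 ++ (PySem.List.pyGetD standart_options st.2 "" ++ " "), st.2 + 1)
        else
          let index : Int := ((PySem.List.index? standart_options item).getD 0 : Int)
          (st.1 ++ (PySem.List.pyGetD standart_options (index + i + 1) "" ++ " "), st.2)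
      ) (("", (0 : Int)))
    let winSt := (PySem.List.pyRange 0 size 1).foldl (fun st i =>
        if ((PySem.List.index? standart_options item).getD 0 : Int) - i - 1 < 0 then
          (st.1 ++ (PySem.List.pyGetD standart_options st.2 "" ++ " "), st.2 - 1)
        else
          let index : Int := ((PySem.List.index? standart_options item).getD 0 : Int)
          (st.1 ++ (PySem.List.pyGetD standart_options (index - i - 1) "" ++ " "), st.2)
      ) (("", (-1 : Int)))
    combinations.insert item [("win", winSt.1), ("lose", loseSt.1)]
  ) PySem.Dict.empty).items

-- ===== PORT B =====
-- ''.join(f"{x} " for x in …) is ported as String.join of the mapped list (String.join IS the fold ''.join performs);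
-- reversed(…) is .reverse, the slices are PySem.List.slice.
def update_opions_alt (standart_options : List String) : List (String × List (String × String)) :=
  let n : Int := (standart_options.length : Int)
  let size : Int := PySem.Int.floordiv n 2
  let doubled := standart_options ++ standart_options
  (standart_options.foldl (fun combinations item =>
    let idx : Int := ((PySem.List.index? standart_options item).getD 0 : Int)
    let lose_combine := String.join ((PySem.List.slice doubled (some (idx + 1)) (some (idx + 1 + size))).map (fun x => x ++ " "))
    let win_combine := String.join (((PySem.List.slice doubled (some (idx + n - size)) (some (idx + n))).reverse).map (fun x => x ++ " "))
    combinations.insert item [("win", win_combine), ("lose", lose_combine)]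
  ) PySem.Dict.empty).items

-- ===== PRECONDITION & SPEC =====
def Spec_update_opions (standart_options : List String) (out : List (String × List (String × String))) : Prop := out = update_opions_alt standart_options
instance (standart_options : List String) (out : List (String × List (String × String))) : Decidable (Spec_update_opions standart_options out) := by unfold Spec_update_opions; infer_instance

-- ===== CLAIM (what is proved, stated in full; the proofs are below) =====
def Claim_equal_update_opions : Prop := ∀ (standart_options : List String), Dom_update_opions standart_options → Spec_update_opions standart_options (update_opions standart_options)

-- ===== LEMMAS AND PROOFS =====

-- accumulate the "x " pieces the way A's loops do
def pvCat (l : List String) : String := l.foldl (fun a x => a ++ (x ++ " ")) ""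

lemma pvCat_append_singleton (l : List String) (x : String) :
    pvCat (l ++ [x]) = pvCat l ++ (x ++ " ") := by
  simp [pvCat, List.foldl_append]

lemma join_map_space (l : List String) :
    String.join (l.map (fun x => x ++ " ")) = pvCat l := by
  simp [String.join, pvCat, List.foldl_map]

lemma getD_append_left {α : Type} (xs ys : List α) (j : Nat) (d : α) (h : j < xs.length) :
    (xs ++ ys).getD j d = xs.getD j d := by
  simp [List.getD_eq_getElem?_getD, List.getElem?_append_left h]

lemma getD_append_right {α : Type} (xs ys : List α) (j : Nat) (d : α) (h : xs.length ≤ j) :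
    (xs ++ ys).getD j d = ys.getD (j - xs.length) d := by
  simp [List.getD_eq_getElem?_getD, List.getElem?_append_right h]

lemma dropTake_eq_map_range (xs : List String) (a m : Nat) (h : a + m ≤ xs.length) :
    (xs.drop a).take m = (List.range m).map (fun j => xs.getD (a + j) "") := by
  apply List.ext_getElem
  · simp; omega
  · intro j h1 h2
    simp only [List.getElem_take, List.getElem_drop, List.getElem_map, List.getElem_range]
    rw [List.getD_eq_getElem _ _ (by simp at h1 ⊢; omega)]

lemma reverse_map_range (m : Nat) (f : Nat → String) :
    ((List.range m).map f).reverse = (List.range m).map (fun j => f (m - 1 - j)) := by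
  apply List.ext_getElem
  · simp
  · intro j h1 h2
    simp only [List.getElem_reverse, List.getElem_map, List.getElem_range, List.length_map,
      List.length_range] at h1 h2 ⊢

-- A's lose loop: after the first m iterations the state is the joined window and the wrap count
lemma loseLoop (opts : List String) (k : Nat) (hk : k < opts.length) :
    ∀ (m : Nat), k + m < 2 * opts.length →
    (PySem.List.pyRange 0 (m : Int) 1).foldl (fun st i =>
        if (k : Int) + i + 1 ≥ (opts.length : Int) then
          (st.1 ++ (PySem.List.pyGetD opts st.2 "" ++ " "), st.2 + 1)
        else
          (st.1 ++ (PySem.List.pyGetD opts ((k : Int) + i + 1) "" ++ " "), st.2)) ("", (0 : Int))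
    = (pvCat ((List.range m).map (fun j => (opts ++ opts).getD (k + 1 + j) "")),
       max 0 ((m : Int) + (k : Int) + 1 - (opts.length : Int))) := by
  intro m
  induction m with
  | zero =>
    intro _
    simp [PySem.List.pyRange_one_eq_nil, pvCat]
    omega
  | succ m ih =>
    intro hm
    have hc : ((m + 1 : Nat) : Int) = (m : Int) + 1 := by push_cast; ring
    rw [hc, PySem.List.pyRange_one_succ_right (by positivity), List.foldl_append,
      ih (by omega), List.foldl_cons, List.foldl_nil, List.range_succ, List.map_append,
      List.map_singleton, pvCat_append_singleton]
    split_ifs with h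
    · -- wrap branch: index_slice = m + k + 1 - len
      have ht : max 0 ((m : Int) + (k : Int) + 1 - (opts.length : Int))
          = ((m + k + 1 - opts.length : Nat) : Int) := by omega
      rw [ht]
      rw [show (opts ++ opts).getD (k + 1 + m) "" = opts.getD (k + 1 + m - opts.length) ""
        from getD_append_right _ _ _ _ (by omega)]
      simp only [PySem.List.pyGetD_natCast]
      rw [show m + k + 1 - opts.length = k + 1 + m - opts.length by omega,
        Prod.mk.injEq]
      exact ⟨rfl, by omega⟩
    · rw [show (k : Int) + (m : Int) + 1 = ((k + m + 1 : Nat) : Int) by push_cast; ring]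
      simp only [PySem.List.pyGetD_natCast]
      rw [show (opts ++ opts).getD (k + 1 + m) "" = opts.getD (k + 1 + m) ""
        from getD_append_left _ _ _ _ (by omega),
        show k + m + 1 = k + 1 + m by omega, Prod.mk.injEq]
      exact ⟨rfl, by omega⟩

-- A's win loop: after the first m iterations the state is the joined window and the negative wrap index
lemma winLoop (opts : List String) (k : Nat) (_hk : k < opts.length) :
    ∀ (m : Nat), m ≤ opts.length →
    (PySem.List.pyRange 0 (m : Int) 1).foldl (fun st i =>
        if (k : Int) - i - 1 < 0 then
          (st.1 ++ (PySem.List.pyGetD opts st.2 "" ++ " "), st.2 - 1)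
        else
          (st.1 ++ (PySem.List.pyGetD opts ((k : Int) - i - 1) "" ++ " "), st.2)) ("", (-1 : Int))
    = (pvCat ((List.range m).map (fun j => (opts ++ opts).getD (k + opts.length - 1 - j) "")),
       -1 - max 0 ((m : Int) - (k : Int))) := by
  intro m
  induction m with
  | zero =>
    intro _
    simp [PySem.List.pyRange_one_eq_nil, pvCat]
  | succ m ih =>
    intro hm
    have hc : ((m + 1 : Nat) : Int) = (m : Int) + 1 := by push_cast; ring
    rw [hc, PySem.List.pyRange_one_succ_right (by positivity), List.foldl_append,
      ih (by omega), List.foldl_cons, List.foldl_nil, List.range_succ, List.map_append,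
      List.map_singleton, pvCat_append_singleton]
    split_ifs with h
    · -- wrap branch: negative index -(1 + m - k)
      rw [show (-1 - max 0 ((m : Int) - (k : Int))) = -((1 + m - k : Nat) : Int) by omega,
        PySem.List.pyGetD_neg_natCast opts (1 + m - k) "" (by omega) (by omega),
        show (opts ++ opts).getD (k + opts.length - 1 - m) "" = opts.getD (k + opts.length - 1 - m) ""
          from getD_append_left _ _ _ _ (by omega),
        List.getD_eq_getElem _ _ (by omega),
        Prod.mk.injEq]
      refine ⟨?_, by omega⟩
      congr 3
      omega
    · rw [show (k : Int) - (m : Int) - 1 = ((k - m - 1 : Nat) : Int) by omega]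
      simp only [PySem.List.pyGetD_natCast]
      rw [show (opts ++ opts).getD (k + opts.length - 1 - m) ""
            = opts.getD (k + opts.length - 1 - m - opts.length) ""
          from getD_append_right _ _ _ _ (by omega),
        show k + opts.length - 1 - m - opts.length = k - m - 1 by omega, Prod.mk.injEq]
      exact ⟨rfl, by omega⟩

-- ===== VERDICT (by name: the statement is the Claim_ definition above) =====
theorem update_opions_spec : Claim_equal_update_opions := by
  intro opts _
  unfold Spec_update_opions
  simp only [update_opions, update_opions_alt]
  congr 1
  apply PySem.List.foldl_congr_mem
  intro acc item hmem
  obtain ⟨k, hfind⟩ := Option.isSome_iff_exists.mp ((PySem.List.index?_isSome_iff opts item).mpr hmem)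
  obtain ⟨hk, -, -⟩ := PySem.List.getElem_of_index?_eq_some hfind
  have hsz : PySem.Int.floordiv ((opts.length : Int)) 2 = ((opts.length / 2 : Nat) : Int) := by
    exact_mod_cast PySem.Int.floordiv_natCast opts.length 2
  set sz := opts.length / 2 with hszdef
  have hszle : sz ≤ opts.length := Nat.div_le_self _ _
  simp only [hfind, Option.getD_some, hsz]
  rw [loseLoop opts k hk sz (by omega), winLoop opts k hk sz (by omega)]
  rw [show ((k : Nat) : Int) + 1 = ((k + 1 : Nat) : Int) by push_cast; ring]
  rw [show ((k + 1 : Nat) : Int) + (sz : Int) = (((k + 1 : Nat) : Int) + ((sz : Nat) : Int)) from rfl]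
  rw [PySem.List.slice_natCast_add (opts ++ opts) (k + 1) sz]
  rw [show (k : Int) + (opts.length : Int) - (sz : Int) = ((k + opts.length - sz : Nat) : Int) by omega,
    show (k : Int) + (opts.length : Int) = (((k + opts.length - sz : Nat) : Int) + ((sz : Nat) : Int)) by omega,
    PySem.List.slice_natCast_add (opts ++ opts) (k + opts.length - sz) sz,
    dropTake_eq_map_range (opts ++ opts) (k + 1) sz (by simp; omega),
    dropTake_eq_map_range (opts ++ opts) (k + opts.length - sz) sz (by simp; omega),
    reverse_map_range]
  have hmap : (List.range sz).map (fun j => (opts ++ opts).getD (k + opts.length - sz + (sz - 1 - j)) "")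
      = (List.range sz).map (fun j => (opts ++ opts).getD (k + opts.length - 1 - j) "") :=
    List.map_congr_left (fun j hj => by
      rw [show k + opts.length - sz + (sz - 1 - j) = k + opts.length - 1 - j by
        simp only [List.mem_range] at hj; omega])
  rw [show (fun j => (fun j => (opts ++ opts).getD (k + opts.length - sz + j) "") (sz - 1 - j))
      = (fun j => (opts ++ opts).getD (k + opts.length - sz + (sz - 1 - j)) "") from rfl,
    hmap, join_map_space, join_map_space]
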